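-- pv_equiv track=rewrite | github.com/dsweet99/dryer | tests/benchmark_data/module_001.py | compute_1_8
-- ===== SOURCE A (Python) =====
-- def compute_1_8(a, b, c):
--     x = a * 42 + b * 71
--     y = c * 54 - a * 99
--     for i in range(14):
--         x = x + i * 12
--         y = y - i * 18
--         if x > 5180:
--             x = x % 1090
--     return x + y + 9
-- ===== SOURCE B (Python) =====
-- def compute_1_8(a, b, c):
--     # y is pure linear: closed form (loop subtracts 18*91 = 1638).
--     y = c * 54 - a * 99 - 1638
--     x0 = a * 42 + b * 71
--     # The modulo guard can fire at most once: after x %= 1090 we have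
--     # x < 1090, and the remaining additions total at most 1092, so x
--     # stays <= 2181 <= 5180 forever after.  Hence x is determined by the
--     # FIRST index i whose triangular prefix sum 6*i*(i+1) pushes x0 past
--     # 5180: search for that index instead of simulating the accumulator.
--     for i in range(14):
--         t = 6 * i * (i + 1)
--         if x0 + t > 5180:
--             x = (x0 + t) % 1090 + (1092 - t)
--             break
--     else:
--         x = x0 + 1092
--     return x + y + 9
-- ===== Notes on version B (the rewrite author's own statement) =====
-- stated objective: alternative
-- what changed: Instead of simulating the two accumulators for 14 steps, B computes y in closed form (c*54 - a*99 - 1638) and obtains x by searching for the first index i whose triangular prefix sum 6*i*(i+1) pushes x0 = a*42 + b*71 past 5180 (the modulo guard can fire at most once, since after it x < 1090 and the remaining additions total at most 1092); x is then a single arithmetic expression in that index.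
import Mathlib
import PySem

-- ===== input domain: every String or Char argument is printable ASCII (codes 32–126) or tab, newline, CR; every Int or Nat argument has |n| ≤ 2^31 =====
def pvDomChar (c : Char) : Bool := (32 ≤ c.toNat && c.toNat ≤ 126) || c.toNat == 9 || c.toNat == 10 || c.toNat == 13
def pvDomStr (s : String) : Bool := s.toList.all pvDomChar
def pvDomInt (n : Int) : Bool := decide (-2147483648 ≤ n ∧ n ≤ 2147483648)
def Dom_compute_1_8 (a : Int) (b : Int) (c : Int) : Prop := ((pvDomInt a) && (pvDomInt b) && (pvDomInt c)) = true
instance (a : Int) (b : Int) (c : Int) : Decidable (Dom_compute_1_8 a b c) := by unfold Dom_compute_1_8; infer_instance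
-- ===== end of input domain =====

-- B replaces the loop's simulation entirely: y is closed-form, and x is found by
-- locating the FIRST index whose triangular prefix 6*i*(i+1) pushes x0 past 5180
-- (the modulo can fire at most once), then one arithmetic expression; objective: simpler.

-- ===== PORT A =====
-- A's loop body on the paired state (x, y), exactly the Python loop's statements in order
def pvStepA (p : Int × Int) (i : Int) : Int × Int :=
  let x := p.1 + i * 12
  let y := p.2 - i * 18
  let x := if x > 5180 then PySem.Int.mod x 1090 else x
  (x, y)

def compute_1_8 (a : Int) (b : Int) (c : Int) : Int :=
  let x := a * 42 + b * 71
  let y := c * 54 - a * 99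
  let p := (PySem.List.pyRange 0 14 1).foldl pvStepA (x, y)
  p.1 + p.2 + 9

-- ===== PORT B =====
def compute_1_8_alt (a : Int) (b : Int) (c : Int) : Int :=
  let y := c * 54 - a * 99 - 1638
  let x0 := a * 42 + b * 71
  -- the for/break/else search for the first crossing index
  let x :=
    match (PySem.List.pyRange 0 14 1).find? (fun i => decide (x0 + 6 * i * (i + 1) > 5180)) with
    | some i => PySem.Int.mod (x0 + 6 * i * (i + 1)) 1090 + (1092 - 6 * i * (i + 1))
    | none => x0 + 1092
  x + y + 9

-- ===== PRECONDITION & SPEC =====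
def Spec_compute_1_8 (a : Int) (b : Int) (c : Int) (out : Int) : Prop := out = compute_1_8_alt a b c
instance (a : Int) (b : Int) (c : Int) (out : Int) : Decidable (Spec_compute_1_8 a b c out) := by unfold Spec_compute_1_8; infer_instance

-- ===== CLAIM (what is proved, stated in full; the proofs are below) =====
def Claim_equal_compute_1_8 : Prop := ∀ (a : Int) (b : Int) (c : Int), Dom_compute_1_8 a b c → Spec_compute_1_8 a b c (compute_1_8 a b c)

-- ===== LEMMAS AND PROOFS =====

-- x-projection of A's fold ignores y
theorem pvFoldFst (l : List Int) : ∀ (x y : Int),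
    (l.foldl pvStepA (x, y)).1 =
      l.foldl (fun x i => let x := x + i * 12; if x > 5180 then PySem.Int.mod x 1090 else x) x := by
  induction l with
  | nil => intro x y; rfl
  | cons i t ih => intro x y; simp only [List.foldl_cons]; exact ih _ _

-- y-projection of A's fold: y minus 18 times the index sum
theorem pvFoldSnd (l : List Int) : ∀ (x y : Int),
    (l.foldl pvStepA (x, y)).2 = y - (l.map (fun i => i * 18)).sum := by
  induction l with
  | nil => intro x y; simp
  | cons i t ih =>
      intro x y
      simp only [List.foldl_cons, List.map_cons, List.sum_cons]
      rw [ih]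
      show y - i * 18 - _ = _
      ring

theorem pvSum1638 : ((PySem.List.pyRange 0 14 1).map (fun i => i * 18)).sum = 1638 := by decide

-- if no step can reach the threshold, the guard never fires
theorem pvTailNoMod (l : List Int) : ∀ (x : Int), (∀ i ∈ l, 0 ≤ i) →
    x + (l.map (fun i => i * 12)).sum ≤ 5180 →
    l.foldl (fun x i => let x := x + i * 12; if x > 5180 then PySem.Int.mod x 1090 else x) x
      = x + (l.map (fun i => i * 12)).sum := by
  induction l with
  | nil => intro x _ _; simp
  | cons i t ih =>
      intro x hpos hle
      simp only [List.map_cons, List.sum_cons] at hle ⊢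
      have hts : 0 ≤ (t.map (fun i => i * 12)).sum := by
        apply List.sum_nonneg
        intro z hz
        obtain ⟨j, hj, rfl⟩ := List.mem_map.mp hz
        have := hpos j (List.mem_cons_of_mem _ hj)
        positivity
      simp only [List.foldl_cons]
      have hni : ¬ (x + i * 12 > 5180) := by omega
      rw [if_neg hni, ih _ (fun j hj => hpos j (List.mem_cons_of_mem _ hj)) (by omega)]
      ring

-- tail sums of the squared-increment range, k ≤ 14 (concrete, by cases)
theorem pvTailSum (k : Nat) (hk : k ≤ 14) :
    ((PySem.List.pyRange (k : Int) 14 1).map (fun i => i * 12)).sum = 1092 - 6 * (k : Int) * (k - 1) := by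
  interval_cases k <;> decide

theorem pvTailPos (k : Nat) : ∀ i ∈ PySem.List.pyRange (k : Int) 14 1, 0 ≤ i := by
  intro i hi
  have := (PySem.List.mem_pyRange_one).mp hi
  omega

-- main invariant: entering step k (no mod yet), value is x0 + 6k(k-1)
theorem pvMain (d : Nat) : ∀ (k : Nat), k + d = 14 → ∀ (x0 : Int),
    (PySem.List.pyRange (k : Int) 14 1).foldl
        (fun x i => let x := x + i * 12; if x > 5180 then PySem.Int.mod x 1090 else x)
        (x0 + 6 * (k : Int) * (k - 1)) =
      match (PySem.List.pyRange (k : Int) 14 1).find? (fun i => decide (x0 + 6 * i * (i + 1) > 5180)) with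
      | some i => PySem.Int.mod (x0 + 6 * i * (i + 1)) 1090 + (1092 - 6 * i * (i + 1))
      | none => x0 + 1092 := by
  induction d with
  | zero =>
      intro k hk x0
      have : (k : Int) = 14 := by omega
      rw [this, PySem.List.pyRange_one_eq_nil (by norm_num)]
      simp
  | succ d ih =>
      intro k hk x0
      have hlt : (k : Int) < 14 := by omega
      rw [PySem.List.pyRange_one_cons hlt]
      simp only [List.foldl_cons, List.find?_cons]
      have harith : x0 + 6 * (k : Int) * (k - 1) + (k : Int) * 12 = x0 + 6 * (k : Int) * (k + 1) := by ring
      by_cases hc : x0 + 6 * (k : Int) * (k + 1) > 5180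
      · rw [decide_eq_true hc]
        simp only [harith, if_pos hc]
        have hmlt : PySem.Int.mod (x0 + 6 * (k : Int) * (k + 1)) 1090 < 1090 :=
          PySem.Int.mod_lt _ (by norm_num)
        have hmnn : 0 ≤ PySem.Int.mod (x0 + 6 * (k : Int) * (k + 1)) 1090 :=
          PySem.Int.mod_nonneg _ (by norm_num)
        have hsum : ((PySem.List.pyRange ((k : Int) + 1) 14 1).map (fun i => i * 12)).sum
            = 1092 - 6 * (k : Int) * ((k : Int) + 1) := by
          have hs := pvTailSum (k + 1) (by omega)
          push_cast at hs
          rw [hs]; ring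
        have hpos : ∀ i ∈ PySem.List.pyRange ((k : Int) + 1) 14 1, 0 ≤ i := by
          have hp := pvTailPos (k + 1); push_cast at hp; exact hp
        have hnm := pvTailNoMod (PySem.List.pyRange ((k : Int) + 1) 14 1)
          (PySem.Int.mod (x0 + 6 * (k : Int) * (k + 1)) 1090) hpos
          (by have h1 := hsum
              have hkk : (0:Int) ≤ 6 * (k : Int) * ((k : Int) + 1) := by positivity
              omega)
        rw [hnm, hsum]
      · rw [decide_eq_false hc]
        simp only [harith, if_neg hc]
        have := ih (k + 1) (by omega) x0
        push_cast at this
        rw [show x0 + 6 * (k : Int) * (k + 1) = x0 + 6 * ((k : Int) + 1) * ((k : Int) + 1 - 1) by ring]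
        exact this

-- ===== VERDICT (by name: the statement is the Claim_ definition above) =====
theorem compute_1_8_spec : Claim_equal_compute_1_8 := by
  intro a b c _
  show compute_1_8 a b c = compute_1_8_alt a b c
  unfold compute_1_8 compute_1_8_alt
  have h := pvMain 14 0 rfl (a * 42 + b * 71)
  simp only [Nat.cast_zero] at h
  rw [show (a * 42 + b * 71 + 6 * (0:Int) * (0 - 1)) = a * 42 + b * 71 by ring] at h
  simp only [pvFoldFst, pvFoldSnd, pvSum1638, h]
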